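-- pv_equiv track=rewrite | github.com/LittleZoem/CloudComputing | 3-Document Manipulation and Conversion/src/documents.py | contains_ngrams
-- ===== SOURCE A (Python) =====
-- from typing import List
--
-- def contains_ngrams(documents: List[List[str]], ngrams: List[List[str]], ignore_case: bool = False) -> List[
--     bool]:
--     if ignore_case:
--         documents = [[word.lower() for word in doc] for doc in documents]
--         ngrams = [[word.lower() for word in ngram] for ngram in ngrams]
--     tf = []
--     for doc in documents:
--         if any(any(ngram == doc[i:i + len(ngram)] for i in range(len(doc) - len(ngram) + 1)) for ngram in ngrams):
--             tf.append(True)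
--         else:
--             tf.append(False)
--     return tf
-- ===== SOURCE B (Python) =====
-- from typing import List
--
-- def _match_at(doc: List[str], i: int, g: List[str]) -> bool:
--     # does g occur in doc starting at position i? (early exit at first mismatch)
--     if i + len(g) > len(doc):
--         return False
--     return all(doc[i + k] == g[k] for k in range(len(g)))
--
-- def contains_ngrams(documents: List[List[str]], ngrams: List[List[str]], ignore_case: bool = False) -> List[
--     bool]:
--     if ignore_case:
--         documents = [[word.lower() for word in doc] for doc in documents]
--         ngrams = [[word.lower() for word in ngram] for ngram in ngrams]
--
--     if any(not g for g in ngrams):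
--         # an empty ngram occurs in every document
--         return [True for _ in documents]
--
--     # bucket the ngrams by their first word, then scan each document once:
--     # at position i only the ngrams whose first word is doc[i] are candidates
--     index = {}
--     for g in ngrams:
--         index[g[0]] = index.get(g[0], []) + [g]
--
--     def hit(doc):
--         for i, w in enumerate(doc):
--             if any(_match_at(doc, i, g) for g in index.get(w, [])):
--                 return True
--         return False
--
--     return [hit(doc) for doc in documents]
-- ===== Notes on version B (the rewrite author's own statement) =====
-- stated objective: alternative
-- what changed: B returns early when an empty ngram is present, otherwise buckets the ngrams by their first word in a dict built once and scans each document left to right, running an early-exit word-by-word comparison only for the ngrams whose first word matches the current word, instead of A's per-ngram index loop slicing at every position.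
import Mathlib
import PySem

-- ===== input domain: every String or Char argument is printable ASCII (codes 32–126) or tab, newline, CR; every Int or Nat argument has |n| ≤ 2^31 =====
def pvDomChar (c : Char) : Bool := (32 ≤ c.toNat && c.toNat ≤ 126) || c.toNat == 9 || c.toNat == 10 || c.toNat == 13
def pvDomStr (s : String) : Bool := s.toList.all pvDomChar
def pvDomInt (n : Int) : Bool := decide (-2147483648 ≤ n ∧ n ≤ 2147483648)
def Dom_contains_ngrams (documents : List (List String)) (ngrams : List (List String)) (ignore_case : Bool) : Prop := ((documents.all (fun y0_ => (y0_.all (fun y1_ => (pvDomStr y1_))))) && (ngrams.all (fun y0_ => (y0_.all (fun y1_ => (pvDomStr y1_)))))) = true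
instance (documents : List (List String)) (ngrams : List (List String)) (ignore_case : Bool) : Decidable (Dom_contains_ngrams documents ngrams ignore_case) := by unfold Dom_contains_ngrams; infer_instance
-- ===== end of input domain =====

-- B buckets the ngrams by first word in a dict and scans each document once, checking only the
-- candidates whose first word matches, instead of A's per-ngram index loop over all positions.

-- ===== PORT A =====
def contains_ngrams (documents : List (List String)) (ngrams : List (List String)) (ignore_case : Bool) : List Bool :=
  let documents := if ignore_case then documents.map (fun doc => doc.map PySem.Str.lower) else documents
  let ngrams := if ignore_case then ngrams.map (fun ngram => ngram.map PySem.Str.lower) else ngrams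
  documents.foldl (fun tf doc =>
    if ngrams.any (fun ngram =>
        (PySem.List.pyRange 0 ((doc.length : Int) - (ngram.length : Int) + 1) 1).any
          (fun i => PySem.List.slice doc (some i) (some (i + (ngram.length : Int))) == ngram))
    then tf ++ [true] else tf ++ [false]) []

-- ===== PORT B =====
-- Source B's `_match_at(doc, i, g)`: indices doc[i+k] / g[k] are always in range here
def altMatchAt (doc : List String) (i : Int) (g : List String) : Bool :=
  if i + (g.length : Int) > (doc.length : Int) then false
  else (PySem.List.pyRange 0 (g.length : Int) 1).all
    (fun k => PySem.List.pyGet? doc (i + k) == PySem.List.pyGet? g k)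

-- `index[g[0]] = index.get(g[0], []) + [g]` over the ngrams; every g here is nonempty
-- (the empty-ngram case returns early), so Python's g[0] is ported as g.headD ""
def altIndex (ngrams : List (List String)) : PySem.Dict String (List (List String)) :=
  ngrams.foldl (fun d g => d.modify (g.headD "") [] (fun l => l ++ [g])) PySem.Dict.empty

-- the `for i, w in enumerate(doc)` loop of Source B's `hit`, with its early `return True`
def altGo (index : PySem.Dict String (List (List String))) (doc : List String) : List (Int × String) → Bool
  | [] => false
  | p :: rest =>
    if (index.getD p.2 []).any (fun g => altMatchAt doc p.1 g)
    then true else altGo index doc rest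

def contains_ngrams_alt (documents : List (List String)) (ngrams : List (List String)) (ignore_case : Bool) : List Bool :=
  let documents := if ignore_case then documents.map (fun doc => doc.map PySem.Str.lower) else documents
  let ngrams := if ignore_case then ngrams.map (fun ngram => ngram.map PySem.Str.lower) else ngrams
  if ngrams.any (fun g => g.isEmpty) then documents.map (fun _ => true)
  else
    let index := altIndex ngrams
    documents.map (fun doc => altGo index doc (PySem.List.enumerate doc 0))

-- ===== PRECONDITION & SPEC =====
def Spec_contains_ngrams (documents : List (List String)) (ngrams : List (List String)) (ignore_case : Bool) (out : List Bool) : Prop := out = contains_ngrams_alt documents ngrams ignore_case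
instance (documents : List (List String)) (ngrams : List (List String)) (ignore_case : Bool) (out : List Bool) : Decidable (Spec_contains_ngrams documents ngrams ignore_case out) := by unfold Spec_contains_ngrams; infer_instance

-- ===== CLAIM (what is proved, stated in full; the proofs are below) =====
def Claim_equal_contains_ngrams : Prop := ∀ (documents : List (List String)) (ngrams : List (List String)) (ignore_case : Bool), Dom_contains_ngrams documents ngrams ignore_case → Spec_contains_ngrams documents ngrams ignore_case (contains_ngrams documents ngrams ignore_case)

-- ===== LEMMAS AND PROOFS =====

-- A's inner index loop for one ngram finds exactly an occurrence of g at some position n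
lemma occA (g doc : List String) :
    ((PySem.List.pyRange 0 ((doc.length : Int) - (g.length : Int) + 1) 1).any
      (fun i => PySem.List.slice doc (some i) (some (i + (g.length : Int))) == g)) = true ↔
    ∃ n, n ≤ doc.length ∧ (doc.drop n).take g.length = g := by
  rw [List.any_eq_true]
  constructor
  · rintro ⟨i, hi, hs⟩
    rw [PySem.List.mem_pyRange_one] at hi
    obtain ⟨h0, hlt⟩ := hi
    rw [PySem.List.slice_toNat _ h0 (by omega)] at hs
    have hnat : ((i + (g.length : Int)).toNat - i.toNat) = g.length := by omega
    refine ⟨i.toNat, by omega, ?_⟩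
    rw [hnat] at hs
    exact beq_iff_eq.mp hs
  · rintro ⟨n, hn, he⟩
    have hlen : g.length ≤ doc.length - n := by
      have h2 := congrArg List.length he
      rw [List.length_take, List.length_drop] at h2
      omega
    refine ⟨(n : Int), ?_, ?_⟩
    · rw [PySem.List.mem_pyRange_one]
      constructor
      · positivity
      · omega
    · rw [PySem.List.slice_toNat _ (by positivity) (by positivity)]
      have hnat : (((n : Int) + (g.length : Int)).toNat - (n : Int).toNat) = g.length := by omega
      rw [hnat]
      simpa using he

-- B's bucket for the word w holds exactly the ngrams whose first word is w
lemma index_getD (ngs : List (List String)) (w : String) :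
    (altIndex ngs).getD w [] = ngs.filter (fun g => g.headD "" == w) := by
  unfold altIndex
  have hmap : ngs.foldl (fun d g => d.modify (g.headD "") [] (fun l => l ++ [g])) PySem.Dict.empty
      = (ngs.map (fun g => (g.headD "", g))).foldl
          (fun d p => d.modify p.1 [] (fun l => l ++ [p.2])) PySem.Dict.empty := by
    rw [List.foldl_map]
  rw [hmap, PySem.Dict.getD_foldl_modify_append]
  simp [List.filter_map, Function.comp_def]

-- the word-by-word check is exactly "g occurs at position n"
lemma matchAt_iff (doc g : List String) (n : Nat) :
    altMatchAt doc (n : Int) g = true ↔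
    n + g.length ≤ doc.length ∧ (doc.drop n).take g.length = g := by
  unfold altMatchAt
  by_cases hb : (n : Int) + (g.length : Int) > (doc.length : Int)
  · simp only [hb, if_true]
    constructor
    · intro h; exact absurd h (by simp)
    · intro h; omega
  · have hle : n + g.length ≤ doc.length := by omega
    simp only [hb, if_false]
    rw [List.all_eq_true]
    constructor
    · intro h
      refine ⟨hle, ?_⟩
      apply List.ext_getElem
      · rw [List.length_take, List.length_drop]; omega
      · intro j hj1 hj2
        rw [List.length_take, List.length_drop] at hj1
        have hjg : j < g.length := by omega
        have := h (j : Int) (by rw [PySem.List.mem_pyRange_one]; constructor <;> omega)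
        simp only at this
        have hcast : (n : Int) + (j : Int) = ((n + j : Nat) : Int) := by push_cast; ring
        rw [hcast, PySem.List.pyGet?_natCast, PySem.List.pyGet?_natCast] at this
        have hnj : n + j < doc.length := by omega
        rw [List.getElem?_eq_getElem hnj, List.getElem?_eq_getElem hjg] at this
        have heq := beq_iff_eq.mp this
        simp only [Option.some.injEq] at heq
        rw [List.getElem_take, List.getElem_drop]
        simpa using heq
    · rintro ⟨-, he⟩
      intro k hk
      rw [PySem.List.mem_pyRange_one] at hk
      obtain ⟨hk0, hkm⟩ := hk
      have hkg : k.toNat < g.length := by omega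
      have hcast : (n : Int) + k = ((n + k.toNat : Nat) : Int) := by omega
      rw [hcast, PySem.List.pyGet?_natCast, ← Int.toNat_of_nonneg hk0, PySem.List.pyGet?_natCast]
      simp only [Int.toNat_natCast]
      have hnj : n + k.toNat < doc.length := by omega
      rw [List.getElem?_eq_getElem hnj, List.getElem?_eq_getElem hkg]
      have := congrArg (fun l => l[k.toNat]?) he
      simp only [List.getElem?_take, hkg, if_pos, List.getElem?_drop] at this
      rw [List.getElem?_eq_getElem hnj, List.getElem?_eq_getElem hkg] at this
      simp only [Option.some.injEq] at this
      simpa using this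

-- B's document scan unrolled: it is an `any` over the remaining (index, word) pairs
lemma altGo_eq_any (idx : PySem.Dict String (List (List String))) (doc : List String)
    (l : List (Int × String)) :
    altGo idx doc l = l.any (fun p => (idx.getD p.2 []).any (fun g => altMatchAt doc p.1 g)) := by
  induction l with
  | nil => simp [altGo]
  | cons p rest ih =>
    simp only [altGo, List.any_cons, ih]
    by_cases hc : (idx.getD p.2 []).any (fun g => altMatchAt doc p.1 g) = true
    · simp [hc]
    · rw [Bool.not_eq_true] at hc
      simp [hc]

-- the per-document equality of the two programs (on already-preprocessed lists)
lemma perDoc (ngs : List (List String)) (doc : List String) :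
    ngs.any (fun ngram =>
        (PySem.List.pyRange 0 ((doc.length : Int) - (ngram.length : Int) + 1) 1).any
          (fun i => PySem.List.slice doc (some i) (some (i + (ngram.length : Int))) == ngram))
    = (if ngs.any (fun g => g.isEmpty) then true
       else altGo (altIndex ngs) doc (PySem.List.enumerate doc 0)) := by
  by_cases hE : ngs.any (fun g => g.isEmpty) = true
  · simp only [hE, if_true]
    rw [List.any_eq_true] at hE
    obtain ⟨g, hg, hg0⟩ := hE
    have hgnil : g = [] := List.isEmpty_iff.mp hg0
    subst hgnil
    rw [List.any_eq_true]
    exact ⟨[], hg, (occA [] doc).mpr ⟨0, by omega, by simp⟩⟩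
  · rw [Bool.not_eq_true] at hE
    simp only [hE, Bool.false_eq_true, if_false]
    have hne : ∀ g ∈ ngs, g ≠ [] := by
      intro g hg hnil
      subst hnil
      have := List.any_eq_false.mp hE [] hg
      simp at this
    rw [Bool.eq_iff_iff, List.any_eq_true, altGo_eq_any, List.any_eq_true]
    constructor
    · -- A finds g at position n  ⇒  B finds it at enumerate entry (n, doc[n])
      rintro ⟨g, hg, hA⟩
      obtain ⟨n, hn, he⟩ := (occA g doc).mp hA
      have hg0 : 0 < g.length := List.length_pos_iff.mpr (hne g hg)
      have hlen : g.length ≤ doc.length - n := by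
        have h2 := congrArg List.length he
        rw [List.length_take, List.length_drop] at h2
        omega
      have hnlt : n < doc.length := by omega
      refine ⟨((n : Int), doc[n]), ?_, List.any_eq_true.mpr ⟨g, ?_, ?_⟩⟩
      · rw [PySem.List.mem_enumerate_iff]
        exact ⟨n, hnlt, by simp⟩
      · -- g's first word is doc[n]
        rw [index_getD, List.mem_filter]
        refine ⟨hg, ?_⟩
        have hhead : g.head? = some doc[n] := by
          have h1 : g.head? = (doc.drop n).head? := by
            rw [← he, List.head?_take]
            simp [Nat.pos_iff_ne_zero.mp hg0]
          rw [h1, List.head?_drop, List.getElem?_eq_getElem hnlt]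
        cases g with
        | nil => exact absurd rfl (hne _ hg)
        | cons w0 gt =>
          simp only [List.head?_cons, Option.some.injEq] at hhead
          simp [hhead]
      · exact (matchAt_iff doc g n).mpr ⟨by omega, he⟩
    · -- B finds g at entry (i, w)  ⇒  A finds g at position i.toNat
      rintro ⟨p, hp, hany⟩
      rw [List.any_eq_true] at hany
      obtain ⟨g, hgb, hs⟩ := hany
      rw [index_getD, List.mem_filter] at hgb
      rw [PySem.List.mem_enumerate_iff] at hp
      obtain ⟨k, hk, hpk⟩ := hp
      subst hpk
      simp only [zero_add] at hs
      obtain ⟨-, he⟩ := (matchAt_iff doc g k).mp hs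
      exact ⟨g, hgb.1, (occA g doc).mpr ⟨k, by omega, he⟩⟩

-- A's accumulator loop over the documents is a map of the per-document test
lemma fold_eq (ds ngs : List (List String)) :
    ds.foldl (fun tf doc =>
      if ngs.any (fun ngram =>
          (PySem.List.pyRange 0 ((doc.length : Int) - (ngram.length : Int) + 1) 1).any
            (fun i => PySem.List.slice doc (some i) (some (i + (ngram.length : Int))) == ngram))
      then tf ++ [true] else tf ++ [false]) [] =
    ds.map (fun doc => ngs.any (fun ngram =>
        (PySem.List.pyRange 0 ((doc.length : Int) - (ngram.length : Int) + 1) 1).any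
          (fun i => PySem.List.slice doc (some i) (some (i + (ngram.length : Int))) == ngram))) := by
  have h : ∀ (tf : List Bool) (doc : List String),
      (if ngs.any (fun ngram =>
          (PySem.List.pyRange 0 ((doc.length : Int) - (ngram.length : Int) + 1) 1).any
            (fun i => PySem.List.slice doc (some i) (some (i + (ngram.length : Int))) == ngram))
       then tf ++ [true] else tf ++ [false])
      = tf ++ [ngs.any (fun ngram =>
          (PySem.List.pyRange 0 ((doc.length : Int) - (ngram.length : Int) + 1) 1).any
            (fun i => PySem.List.slice doc (some i) (some (i + (ngram.length : Int))) == ngram))] := by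
    intro tf doc
    by_cases hc : ngs.any (fun ngram =>
        (PySem.List.pyRange 0 ((doc.length : Int) - (ngram.length : Int) + 1) 1).any
          (fun i => PySem.List.slice doc (some i) (some (i + (ngram.length : Int))) == ngram)) = true
    · simp [hc]
    · rw [Bool.not_eq_true] at hc
      simp [hc]
  rw [PySem.List.foldl_congr_mem _ _ (fun tf doc => tf ++ [ngs.any (fun ngram =>
      (PySem.List.pyRange 0 ((doc.length : Int) - (ngram.length : Int) + 1) 1).any
        (fun i => PySem.List.slice doc (some i) (some (i + (ngram.length : Int))) == ngram))]) _
      (fun tf doc _ => h tf doc)]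
  exact PySem.List.foldl_append_singleton_eq_map _ _ _

-- ===== VERDICT (by name: the statement is the Claim_ definition above) =====
theorem contains_ngrams_spec : Claim_equal_contains_ngrams := by
  intro documents ngrams ignore_case _
  unfold Spec_contains_ngrams contains_ngrams contains_ngrams_alt
  rw [fold_eq]
  by_cases hE : ((if ignore_case then ngrams.map (fun ngram => ngram.map PySem.Str.lower) else ngrams).any
      (fun g => g.isEmpty)) = true
  · simp only [hE, if_true]
    refine List.map_congr_left ?_
    intro doc _
    have := perDoc (if ignore_case then ngrams.map (fun ngram => ngram.map PySem.Str.lower) else ngrams) doc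
    rw [hE] at this
    simpa using this
  · rw [Bool.not_eq_true] at hE
    simp only [hE, Bool.false_eq_true, if_false]
    refine List.map_congr_left ?_
    intro doc _
    have := perDoc (if ignore_case then ngrams.map (fun ngram => ngram.map PySem.Str.lower) else ngrams) doc
    rw [hE] at this
    simpa using this
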